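-- pv_equiv track=rewrite | github.com/mariopinto18/ESMAD-AED-23-24 | Ficha 05/Ex06.py | standardName
-- ===== SOURCE A (Python) =====
-- def standardName(name):
--     """
--     function receives a string text and returns the firt name, last name and
--     initials of middle names
--     """
--     newName=""
--     # --------- primeiro nome
--     pos = name.find(" ")             # 1º espaço
--     if pos != -1:
--         newName = name[:pos]        # obtem primeiro nome (até espaço)
--     else:
--         return "nome inválido!"
--
-- # --------- Iniciais dos nomes intermédios
--     for i in range(name.find(" "), name.rfind(" ")):
--         if name[i] == " ":
--             newName+= " " + name[i+1]+ "."
--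
-- # ---------  ultimo nome
--     pos = name.rfind(" ")               # 1º espaço a partir do fim
--     if pos != -1:
--         newName+= " " + name[pos+1:]    # obtem o ultimo nome
--
--     return newName
-- ===== SOURCE B (Python) =====
-- def standardName(name):
--     """Recursive decomposition: emit the first name, then recurse on the
--     suffix after each space; no rfind, no index loop."""
--     i = name.find(' ')
--     if i == -1:
--         return "nome inválido!"
--     return name[:i] + _afterSpace(name[i+1:])
--
--
-- def _afterSpace(s):
--     j = s.find(' ')
--     if j == -1:
--         return ' ' + s
--     return ' ' + s[0] + '.' + _afterSpace(s[j+1:])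
-- ===== Notes on version B (the rewrite author's own statement) =====
-- stated objective: alternative
-- what changed: B replaces A's find/rfind scans and index-range loop that re-tests every character with a recursive decomposition: it emits the first name, then a recursive helper consumes the suffix after each space, emitting one middle initial per step and the last name when no space remains.
import Mathlib
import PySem

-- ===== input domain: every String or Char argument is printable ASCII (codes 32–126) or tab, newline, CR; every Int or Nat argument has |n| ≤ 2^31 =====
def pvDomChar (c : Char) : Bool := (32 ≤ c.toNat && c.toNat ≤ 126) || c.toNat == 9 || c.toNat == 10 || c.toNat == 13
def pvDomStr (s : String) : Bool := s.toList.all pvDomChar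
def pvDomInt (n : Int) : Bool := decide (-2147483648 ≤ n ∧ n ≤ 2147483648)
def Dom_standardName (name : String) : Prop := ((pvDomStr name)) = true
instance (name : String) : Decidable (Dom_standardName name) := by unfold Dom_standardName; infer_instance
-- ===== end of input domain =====

-- B re-implements the formatting recursively: first name, then a recursion on the suffix after
-- each space; A scans with find/rfind and an index-range loop (alternative decomposition).


-- ===== PORT A =====
-- name[i] / name[i+1] are ported with pyGetD: inside the loop i ranges over
-- [find, rfind), so both indexes are always in range and Python never raises.
def standardName (name : String) : String :=
  let cs := name.toList
  let pos := PySem.Chars.find cs [' ']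
  if pos ≠ -1 then
    let n1 := PySem.List.slice cs none (some pos)          -- name[:pos]
    let n2 := (PySem.List.pyRange (PySem.Chars.find cs [' ']) (PySem.Chars.rfind cs [' ']) 1).foldl
        (fun acc i =>
          if PySem.List.pyGetD cs i ' ' == ' ' then
            acc ++ (' ' :: PySem.List.pyGetD cs (i + 1) ' ' :: ['.'])
          else acc) n1
    let pos2 := PySem.Chars.rfind cs [' ']
    let n3 := if pos2 ≠ -1 then n2 ++ (' ' :: PySem.List.slice cs (some (pos2 + 1)) none) else n2
    String.ofList n3
  else "nome inválido!"

-- ===== PORT B =====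
-- termination helper for pvAfterSpace: a found space lies inside the string
lemma pv_find_toNat_lt (s : List Char) (h : PySem.Chars.find s [' '] ≠ -1) :
    (PySem.Chars.find s [' ']).toNat < s.length := by
  have h0 : 0 ≤ PySem.Chars.find s [' '] := by
    have := PySem.Chars.neg_one_le_find s [' ']; omega
  obtain ⟨hp, -⟩ := PySem.Chars.find_spec h0
  by_contra hge
  rw [List.drop_eq_nil_of_le (by omega)] at hp
  exact absurd (List.prefix_nil.mp hp) (by simp)

-- s[0] is ported with pyGetD: it is only evaluated when s contains a space, so s is nonempty
def pvAfterSpace (s : List Char) : List Char :=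
  if h : PySem.Chars.find s [' '] = -1 then ' ' :: s
  else ' ' :: PySem.List.pyGetD s 0 ' ' :: '.' ::
       pvAfterSpace (PySem.List.slice s (some (PySem.Chars.find s [' '] + 1)) none)
termination_by s.length
decreasing_by
  have h0 : 0 ≤ PySem.Chars.find s [' '] := by
    have := PySem.Chars.neg_one_le_find s [' ']; omega
  rw [PySem.List.slice_from s (by omega : (0:Int) ≤ PySem.Chars.find s [' '] + 1),
    List.length_drop]
  have := pv_find_toNat_lt s h
  omega

def standardName_alt (name : String) : String :=
  let cs := name.toList
  let i := PySem.Chars.find cs [' ']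
  if i = -1 then "nome inválido!"
  else String.ofList (PySem.List.slice cs none (some i) ++
        pvAfterSpace (PySem.List.slice cs (some (i + 1)) none))

-- ===== PRECONDITION & SPEC =====
def Spec_standardName (name : String) (out : String) : Prop := out = standardName_alt name
instance (name : String) (out : String) : Decidable (Spec_standardName name out) := by unfold Spec_standardName; infer_instance

-- ===== CLAIM (what is proved, stated in full; the proofs are below) =====
def Claim_equal_standardName : Prop := ∀ (name : String), Dom_standardName name → Spec_standardName name (standardName name)

-- ===== LEMMAS AND PROOFS =====

-- the list of space positions of s, in increasing order (proof-side characterisation)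
def pvSpN (s : List Char) : List Nat := (List.range s.length).filter (fun i => s[i]? == some ' ')

-- the emission of A's loop for the space at position p
def pvEm (s : List Char) (p : Nat) : List Char := ' ' :: s.getD (p + 1) ' ' :: ['.']

-- what pvAfterSpace computes, phrased through the space-position list
def pvRestSpec (s : List Char) : List Char :=
  if (pvSpN s).isEmpty then ' ' :: s
  else (' ' :: s.getD 0 ' ' :: ['.']) ++ ((pvSpN s).dropLast).flatMap (pvEm s) ++
       (' ' :: s.drop ((pvSpN s).getLastD 0 + 1))

lemma pv_singleton_prefix_iff (c : Char) (l : List Char) : [c] <+: l ↔ l.head? = some c := by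
  cases l with
  | nil => simp
  | cons a t => simp [List.cons_prefix_cons, eq_comm]

lemma pv_prefix_drop_iff (cs : List Char) (j : Nat) : [' '] <+: cs.drop j ↔ cs[j]? = some ' ' := by
  rw [pv_singleton_prefix_iff, List.head?_drop]

lemma pv_spN_nil (s : List Char) (h : PySem.Chars.find s [' '] = -1) : pvSpN s = [] := by
  rw [pvSpN, List.filter_eq_nil_iff]
  intro i _ hp
  rw [beq_iff_eq] at hp
  have hinf : [' '] <:+: s := by
    obtain ⟨t, ht⟩ := (pv_prefix_drop_iff s i).mpr hp
    exact ⟨s.take i, t, by rw [List.append_assoc, ht]; exact List.take_append_drop _ _⟩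
  exact (PySem.Chars.find_eq_neg_one_iff s [' ']).mp h hinf

lemma pv_spN_cons (c : Char) (s : List Char) :
    pvSpN (c :: s) = (if c = ' ' then [0] else []) ++ (pvSpN s).map (· + 1) := by
  rw [pvSpN, pvSpN, List.length_cons, List.range_succ_eq_map, List.filter_cons, List.filter_map]
  have hpred : ((fun i => (c :: s)[i]? == some ' ') ∘ Nat.succ) = (fun i => s[i]? == some ' ') := by
    funext i; simp
  rw [hpred]
  by_cases hc : c = ' '
  · simp [hc]
  · simp [hc]

lemma pv_spN_shift : ∀ (k : Nat) (s : List Char), (∀ i, i < k → s[i]? ≠ some ' ') →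
    pvSpN s = (pvSpN (s.drop k)).map (· + k) := by
  intro k
  induction k with
  | zero => intro s _; simp
  | succ k ih =>
    intro s hs
    cases s with
    | nil => simp [pvSpN]
    | cons c t =>
      have hc : ¬ c = ' ' := by
        intro hc; exact hs 0 (by omega) (by simp [hc])
      rw [pv_spN_cons, if_neg hc, List.nil_append, List.drop_succ_cons,
        ih t (fun i hi => by simpa using hs (i + 1) (by omega)), List.map_map]
      exact List.map_congr_left (fun a _ => by simp only [Function.comp_apply]; omega)

lemma pv_spN_head (s : List Char) (F : Nat) (hF : s[F]? = some ' ')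
    (hmin : ∀ i, i < F → s[i]? ≠ some ' ') :
    pvSpN s = F :: (pvSpN (s.drop (F + 1))).map (· + (F + 1)) := by
  obtain ⟨hlt, hval⟩ := List.getElem?_eq_some_iff.mp hF
  rw [pv_spN_shift F s hmin, List.drop_eq_getElem_cons hlt, hval, pv_spN_cons, if_pos rfl,
    List.map_append, List.map_map]
  simp only [List.map_cons, List.map_nil, List.cons_append, List.nil_append, Nat.zero_add]
  congr 1
  exact List.map_congr_left (fun a _ => by simp only [Function.comp_apply]; omega)

lemma pv_dropLast_map {α β : Type} (f : α → β) (l : List α) :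
    (l.map f).dropLast = l.dropLast.map f := by
  induction l with
  | nil => simp
  | cons a t ih =>
    cases t with
    | nil => simp
    | cons b u => simp [ih]

lemma pv_getD_drop (s : List Char) (k i : Nat) : (s.drop k).getD i ' ' = s.getD (k + i) ' ' := by
  simp [List.getD, List.getElem?_drop]

lemma pv_glue (cs : List Char) (F : Nat) (hF : cs[F]? = some ' ')
    (hmin : ∀ i, i < F → cs[i]? ≠ some ' ') :
    ((pvSpN cs).dropLast).flatMap (pvEm cs) ++ (' ' :: cs.drop ((pvSpN cs).getLastD 0 + 1)) =
      pvRestSpec (cs.drop (F + 1)) := by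
  rw [pv_spN_head cs F hF hmin]
  cases hu : pvSpN (cs.drop (F + 1)) with
  | nil =>
    simp [pvRestSpec, hu]
  | cons q t =>
    have hem : ∀ p : Nat, pvEm cs (p + (F + 1)) = pvEm (cs.drop (F + 1)) p := by
      intro p
      rw [pvEm, pvEm, pv_getD_drop]
      have harith : p + (F + 1) + 1 = F + 1 + (p + 1) := by omega
      rw [harith]
    rw [pvRestSpec, hu]
    rw [if_neg (by simp)]
    -- dropLast of F :: (nonempty map)
    have hmapne : (q :: t).map (· + (F + 1)) = (q + (F + 1)) :: t.map (· + (F + 1)) := by simp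
    rw [hmapne, List.dropLast_cons₂, ← hmapne, pv_dropLast_map, List.flatMap_cons,
      List.flatMap_map]
    have hflat : (q :: t).dropLast.flatMap (fun a => pvEm cs (a + (F + 1))) =
        (q :: t).dropLast.flatMap (pvEm (cs.drop (F + 1))) := by
      apply List.flatMap_congr
      intro a _
      exact hem a
    rw [hflat]
    -- the getLastD of the shifted list
    have hlast : (F :: (q :: t).map (· + (F + 1))).getLastD 0 = (q :: t).getLastD 0 + (F + 1) := by
      rw [List.getLastD_cons, hmapne, List.getLastD_cons]
      cases t with
      | nil => simp
      | cons b v =>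
        have := List.getLastD_map (f := (· + (F + 1))) (l := b :: v) (a := q)
        simpa using this
    rw [hlast]
    have hdrop : cs.drop ((q :: t).getLastD 0 + (F + 1) + 1) =
        (cs.drop (F + 1)).drop ((q :: t).getLastD 0 + 1) := by
      rw [List.drop_drop]
      congr 1
      omega
    rw [hdrop]
    have hem0 : pvEm cs F = ' ' :: (cs.drop (F + 1)).getD 0 ' ' :: ['.'] := by
      rw [pvEm, pv_getD_drop]
    rw [hem0]

lemma pv_find_facts (s : List Char) (h : ¬ PySem.Chars.find s [' '] = -1) :
    s[(PySem.Chars.find s [' ']).toNat]? = some ' ' ∧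
    ∀ i, i < (PySem.Chars.find s [' ']).toNat → s[i]? ≠ some ' ' := by
  have h0 : 0 ≤ PySem.Chars.find s [' '] := by
    have := PySem.Chars.neg_one_le_find s [' ']; omega
  obtain ⟨hp, hm⟩ := PySem.Chars.find_spec h0
  exact ⟨(pv_prefix_drop_iff s _).mp hp,
    fun i hi hsp => hm i hi ((pv_prefix_drop_iff s i).mpr hsp)⟩

lemma pv_rest_fuel : ∀ (n : Nat) (s : List Char), s.length ≤ n → pvAfterSpace s = pvRestSpec s := by
  intro n
  induction n with
  | zero =>
    intro s hs
    have hnil : s = [] := List.eq_nil_of_length_eq_zero (by omega)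
    subst hnil
    rw [pvAfterSpace, pvRestSpec]
    rw [dif_pos (by decide), if_pos (by decide)]
  | succ n ih =>
    intro s hs
    rw [pvAfterSpace]
    by_cases h : PySem.Chars.find s [' '] = -1
    · rw [dif_pos h, pvRestSpec, pv_spN_nil s h]
      simp
    · rw [dif_neg h]
      obtain ⟨hF, hmin⟩ := pv_find_facts s h
      have h0 : 0 ≤ PySem.Chars.find s [' '] := by
        have := PySem.Chars.neg_one_le_find s [' ']; omega
      have hslice : PySem.List.slice s (some (PySem.Chars.find s [' '] + 1)) none =
          s.drop ((PySem.Chars.find s [' ']).toNat + 1) := by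
        rw [PySem.List.slice_from s (by omega : (0:Int) ≤ PySem.Chars.find s [' '] + 1)]
        congr 1
        omega
      have hlt := pv_find_toNat_lt s h
      rw [hslice, ih (s.drop ((PySem.Chars.find s [' ']).toNat + 1)) (by simp; omega)]
      have hne : ¬ ((pvSpN s).isEmpty = true) := by
        rw [pv_spN_head s _ hF hmin]; simp
      conv_rhs => rw [pvRestSpec]
      rw [if_neg hne, List.append_assoc,
        pv_glue s (PySem.Chars.find s [' ']).toNat hF hmin]
      have hget0 : PySem.List.pyGetD s 0 ' ' = s.getD 0 ' ' := by
        rw [PySem.List.pyGetD_of_nonneg s ' ' (by omega)]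
        norm_num
      rw [hget0]
      simp

lemma pv_rest (s : List Char) : pvAfterSpace s = pvRestSpec s :=
  pv_rest_fuel s.length s le_rfl

-- ===== A-side lemmas (rfind characterisation and the loop shape) =====

lemma pv_rfind_go_succ (cs : List Char) (k : Nat) : PySem.Chars.rfind.go cs [' '] (k+1) =
    if [' '].isPrefixOf (cs.drop (k+1)) then ((k:Int)+1) else PySem.Chars.rfind.go cs [' '] k := by
  simp [PySem.Chars.rfind.go]

lemma pv_rfind_go_le (cs : List Char) : ∀ (k j : Nat), j ≤ k → [' '] <+: cs.drop j →
    (j : Int) ≤ PySem.Chars.rfind.go cs [' '] k := by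
  intro k
  induction k with
  | zero =>
    intro j hj hp
    interval_cases j
    simp only [List.drop_zero] at hp
    simp [PySem.Chars.rfind.go, List.isPrefixOf_iff_prefix, hp]
  | succ k ih =>
    intro j hj hp
    rw [pv_rfind_go_succ]
    split
    · exact_mod_cast Int.ofNat_le.mpr hj
    · rename_i hcond
      rcases Nat.lt_or_ge j (k+1) with hlt | hge
      · exact ih j (by omega) hp
      · exfalso; apply hcond
        have : j = k+1 := by omega
        subst this
        exact List.isPrefixOf_iff_prefix.mpr hp

lemma pv_rfind_go_cases (cs : List Char) : ∀ (k : Nat), PySem.Chars.rfind.go cs [' '] k = -1 ∨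
    ∃ j : Nat, j ≤ k ∧ PySem.Chars.rfind.go cs [' '] k = j ∧ [' '] <+: cs.drop j := by
  intro k
  induction k with
  | zero =>
    by_cases hp : [' '].isPrefixOf cs
    · right; exact ⟨0, le_refl _, by simp [PySem.Chars.rfind.go, hp], by simp [List.isPrefixOf_iff_prefix.mp hp]⟩
    · left; simp [PySem.Chars.rfind.go, hp]
  | succ k ih =>
    rw [pv_rfind_go_succ]
    split
    · rename_i hp
      right; exact ⟨k+1, le_refl _, by push_cast; ring, List.isPrefixOf_iff_prefix.mp hp⟩
    · rcases ih with h | ⟨j, hj, he, hp⟩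
      · left; exact h
      · right; exact ⟨j, by omega, he, hp⟩

lemma pv_loopA (cs : List Char) : ∀ (l : List Int) (acc : List Char),
    l.foldl (fun acc i => if PySem.List.pyGetD cs i ' ' == ' ' then
        acc ++ (' ' :: PySem.List.pyGetD cs (i + 1) ' ' :: ['.']) else acc) acc
    = acc ++ (l.filter (fun i => PySem.List.pyGetD cs i ' ' == ' ')).flatMap
        (fun i => ' ' :: PySem.List.pyGetD cs (i + 1) ' ' :: ['.']) := by
  intro l
  induction l with
  | nil => simp
  | cons x t ih =>
    intro acc
    rw [List.foldl_cons, List.filter_cons]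
    by_cases hx : (PySem.List.pyGetD cs x ' ' == ' ') = true
    · rw [if_pos hx, if_pos hx, ih]; simp
    · rw [if_neg hx, if_neg hx, ih]

-- the Int-valued space list A's indices live in is the cast of pvSpN
lemma pv_spInt (cs : List Char) :
    (PySem.List.pyRange 0 (cs.length : Int) 1).filter (fun i => PySem.List.pyGetD cs i ' ' == ' ')
      = (pvSpN cs).map (fun k : Nat => (k : Int)) := by
  rw [PySem.List.pyRange_zero_natCast, List.filter_map, pvSpN]
  refine congrArg (List.map (fun k : Nat => (k : Int))) (List.filter_congr ?_)
  intro i hi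
  rw [List.mem_range] at hi
  rw [Function.comp_apply, PySem.List.pyGetD_eq_getElem cs ' ' (by omega) (by exact_mod_cast hi)]
  simp [List.getElem?_eq_getElem hi]

lemma pv_main (name : String) : standardName name = standardName_alt name := by
  set cs := name.toList with hcs
  by_cases h : PySem.Chars.find cs [' '] = -1
  · simp only [standardName, standardName_alt]
    rw [← hcs]
    simp [h]
  · -- a space exists
    obtain ⟨hFget, hFmin⟩ := pv_find_facts cs h
    have hF0 : 0 ≤ PySem.Chars.find cs [' '] := by
      have := PySem.Chars.neg_one_le_find cs [' ']
      omega
    set F := PySem.Chars.find cs [' '] with hF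
    obtain ⟨hFlt, hFval⟩ := List.getElem?_eq_some_iff.mp hFget
    have hRdef : PySem.Chars.rfind cs [' '] = PySem.Chars.rfind.go cs [' '] cs.length := rfl
    have hFpre : [' '] <+: cs.drop F.toNat := (pv_prefix_drop_iff cs F.toNat).mpr hFget
    have hFR : (F.toNat : Int) ≤ PySem.Chars.rfind cs [' '] := by
      rw [hRdef]; exact pv_rfind_go_le cs cs.length F.toNat (le_of_lt hFlt) hFpre
    rcases pv_rfind_go_cases cs cs.length with hneg | ⟨Rn, hRle, hReqgo, hRpre⟩
    · rw [← hRdef] at hneg; omega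
    have hReq : PySem.Chars.rfind cs [' '] = (Rn : Int) := by rw [hRdef, hReqgo]
    have hRget : cs[Rn]? = some ' ' := (pv_prefix_drop_iff cs Rn).mp hRpre
    have hRmax : ∀ i : Nat, Rn < i → cs[i]? ≠ some ' ' := by
      intro i hi hget
      have hilt : i < cs.length := (List.getElem?_eq_some_iff.mp hget).1
      have := pv_rfind_go_le cs cs.length i (le_of_lt hilt) ((pv_prefix_drop_iff cs i).mpr hget)
      rw [← hRdef, hReq] at this
      omega
    have hRlen : Rn < cs.length := (List.getElem?_eq_some_iff.mp hRget).1
    have hpiff : ∀ i : Int, 0 ≤ i → i < (cs.length:Int) →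
        (((PySem.List.pyGetD cs i ' ' == ' ') = true) ↔ cs[i.toNat]? = some ' ') := by
      intro i h0 h1
      rw [PySem.List.pyGetD_eq_getElem cs ' ' h0 h1, beq_iff_eq, List.getElem?_eq_some_iff]
      constructor
      · intro hv; exact ⟨by omega, hv⟩
      · rintro ⟨_, hv⟩; exact hv
    have hsplit : PySem.List.pyRange 0 (cs.length : Int) 1
        = PySem.List.pyRange 0 F 1 ++ (PySem.List.pyRange F (Rn:Int) 1 ++ ((Rn:Int) :: PySem.List.pyRange ((Rn:Int)+1) (cs.length:Int) 1)) := by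
      have h1 : PySem.List.pyRange (Rn:Int) (cs.length:Int) 1 = (Rn:Int) :: PySem.List.pyRange ((Rn:Int)+1) (cs.length:Int) 1 :=
        PySem.List.pyRange_one_cons (by omega)
      rw [← h1, ← PySem.List.pyRange_one_append F (Rn:Int) (cs.length:Int) (by omega) (by omega),
        ← PySem.List.pyRange_one_append 0 F (cs.length:Int) hF0 (by omega)]
    have hfilt1 : (PySem.List.pyRange 0 F 1).filter (fun i => PySem.List.pyGetD cs i ' ' == ' ') = [] := by
      rw [List.filter_eq_nil_iff]
      intro i hi hp
      rw [PySem.List.mem_pyRange_one] at hi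
      have hget := (hpiff i hi.1 (by omega)).mp hp
      exact hFmin i.toNat (by omega) hget
    have hfilt3 : (PySem.List.pyRange ((Rn:Int)+1) (cs.length:Int) 1).filter (fun i => PySem.List.pyGetD cs i ' ' == ' ') = [] := by
      rw [List.filter_eq_nil_iff]
      intro i hi hp
      rw [PySem.List.mem_pyRange_one] at hi
      have hget := (hpiff i (by omega) hi.2).mp hp
      exact hRmax i.toNat (by omega) hget
    have hpR : (PySem.List.pyGetD cs (Rn:Int) ' ' == ' ') = true := by
      apply (hpiff (Rn:Int) (by omega) (by omega)).mpr
      simpa using hRget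
    -- the full space list, Int-cast, ends in Rn
    have hfull : (PySem.List.pyRange F (Rn:Int) 1).filter (fun i => PySem.List.pyGetD cs i ' ' == ' ') ++ [(Rn:Int)]
        = (pvSpN cs).map (fun k : Nat => (k : Int)) := by
      have := pv_spInt cs
      rw [hsplit, List.filter_append, List.filter_append, List.filter_cons, if_pos hpR,
        hfilt1, hfilt3, List.nil_append] at this
      simpa using this
    have hmid : (PySem.List.pyRange F (Rn:Int) 1).filter (fun i => PySem.List.pyGetD cs i ' ' == ' ')
        = ((pvSpN cs).dropLast).map (fun k : Nat => (k : Int)) := by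
      have h1 := congrArg List.dropLast hfull
      rw [List.dropLast_concat, pv_dropLast_map] at h1
      exact h1
    have hlastR : (pvSpN cs).getLastD 0 = Rn := by
      have h2 := congrArg (fun l => l.getLastD (((0:Nat):Int))) hfull
      simp only at h2
      rw [List.getLastD_concat] at h2
      have h3 : ((pvSpN cs).map (fun k : Nat => (k:Int))).getLastD (((0:Nat):Int))
          = (((pvSpN cs).getLastD 0 : Nat) : Int) := List.getLastD_map
      rw [h3] at h2
      exact_mod_cast h2.symm
    -- unfold both ports
    simp only [standardName, standardName_alt]
    rw [← hcs, ← hF, if_pos (show F ≠ -1 from h), if_neg h, hReq,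
      if_pos (show (Rn:Int) ≠ -1 by omega), pv_loopA, hmid, List.flatMap_map]
    have hemeq : ((pvSpN cs).dropLast).flatMap (fun a : Nat => ' ' :: PySem.List.pyGetD cs ((a : Int) + 1) ' ' :: ['.'])
        = ((pvSpN cs).dropLast).flatMap (pvEm cs) := by
      apply List.flatMap_congr
      intro a _
      rw [pvEm, PySem.List.pyGetD_of_nonneg cs ' ' (by omega : (0:Int) ≤ (a:Int) + 1)]
      congr 2
    rw [hemeq]
    have hsliceA : PySem.List.slice cs (some ((Rn : Int) + 1)) none = cs.drop (Rn + 1) := by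
      rw [PySem.List.slice_from cs (by omega : (0:Int) ≤ (Rn:Int) + 1)]
      congr 1
    have hsliceB : PySem.List.slice cs (some (F + 1)) none = cs.drop (F.toNat + 1) := by
      rw [PySem.List.slice_from cs (by omega : (0:Int) ≤ F + 1)]
      congr 1
      omega
    rw [hsliceA, hsliceB, pv_rest, ← hlastR, List.append_assoc,
      pv_glue cs F.toNat hFget hFmin]

-- ===== VERDICT (by name: the statement is the Claim_ definition above) =====
theorem standardName_spec : Claim_equal_standardName := by
  intro name _
  unfold Spec_standardName
  exact pv_main name
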